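-- pv_equiv track=rewrite | github.com/sueszli/vector-database-benchmark | dataset/python-mutated/mmcif.py | mmcif_loop_to_list
-- ===== SOURCE A (Python) =====
-- from typing import Any, Mapping, Optional, Sequence, Tuple
--
-- MmCIFDict = Mapping[str, Sequence[str]]
--
-- def mmcif_loop_to_list(prefix: str, parsed_info: MmCIFDict) -> Sequence[Mapping[str, str]]:
--     if False:
--         i = 10
--         return i + 15
--     "Extracts loop associated with a prefix from mmCIF data as a list.\n\n    Reference for loop_ in mmCIF:\n        http://mmcif.wwpdb.org/docs/tutorials/mechanics/pdbx-mmcif-syntax.html\n\n    Args:\n        prefix: Prefix shared by each of the data items in the loop.\n            e.g. '_entity_poly_seq.', where the data items are _entity_poly_seq.num,\n            _entity_poly_seq.mon_id. Should include the trailing period.\n        parsed_info: A dict of parsed mmCIF data, e.g. _mmcif_dict from a Biopython\n            parser.\n\n    Returns:\n        Returns a list of dicts; each dict represents 1 entry from an mmCIF loop.\n    "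
--     cols = []
--     data = []
--     for (key, value) in parsed_info.items():
--         if key.startswith(prefix):
--             cols.append(key)
--             data.append(value)
--     assert all([len(xs) == len(data[0]) for xs in data]), 'mmCIF error: Not all loops are the same length: %s' % cols
--     return [dict(zip(cols, xs)) for xs in zip(*data)]
-- ===== SOURCE B (Python) =====
-- def mmcif_loop_to_list(prefix, parsed_info):
--     matched = [(k, v) for k, v in parsed_info.items() if k.startswith(prefix)]
--     cols = [k for k, _ in matched]
--     assert all(len(v) == len(matched[0][1]) for _, v in matched), \
--         'mmCIF error: Not all loops are the same length: %s' % cols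
--     def rows(columns):
--         if not columns or not columns[0][1]:
--             return []
--         return [{k: vs[0] for k, vs in columns}] + rows([(k, vs[1:]) for k, vs in columns])
--     return rows(matched)
-- ===== Notes on version B (the rewrite author's own statement) =====
-- stated objective: alternative
-- what changed: Replaces A's zip(*data) transpose plus dict(zip(cols, xs)) per row with a recursive head-peeling transpose: each recursion step builds one row from the current head of every matched column, then recurses on the tails; no zip and no index arithmetic.
import Mathlib
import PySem

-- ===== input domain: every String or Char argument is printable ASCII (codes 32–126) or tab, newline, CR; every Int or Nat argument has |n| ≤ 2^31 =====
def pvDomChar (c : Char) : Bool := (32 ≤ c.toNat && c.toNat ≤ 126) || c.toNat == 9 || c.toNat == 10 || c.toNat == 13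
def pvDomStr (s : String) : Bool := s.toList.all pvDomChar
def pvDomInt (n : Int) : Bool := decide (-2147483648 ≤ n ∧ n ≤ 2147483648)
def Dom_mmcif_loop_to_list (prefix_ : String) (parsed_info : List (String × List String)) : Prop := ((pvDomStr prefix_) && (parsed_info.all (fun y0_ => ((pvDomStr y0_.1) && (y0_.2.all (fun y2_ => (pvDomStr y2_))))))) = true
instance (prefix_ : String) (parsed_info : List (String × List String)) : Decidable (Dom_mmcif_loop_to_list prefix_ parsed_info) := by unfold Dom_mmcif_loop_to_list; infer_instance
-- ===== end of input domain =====

-- B replaces A's zip(*data) transpose + per-row dict(zip(cols,xs)) with a recursive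
-- head-peeling transpose (one row per recursion step, recursing on the tails);
-- objective: alternative decomposition, same cost.

-- ===== PORT A =====
-- Python 'd[k] = v' on a dict: overwrite in place keeps position, a new key appends (exact).
def pyDictInsert (d : List (String × String)) (k v : String) : List (String × String) :=
  if d.any (fun p => p.1 == k) then d.map (fun p => if p.1 == k then (k, v) else p)
  else d ++ [(k, v)]

-- number of tuples zip(*data) yields: min of the row lengths, 0 for no rows (exact)
def pyZipMinLen : List (List String) → Nat
  | [] => 0
  | d :: ds => ds.foldl (fun m l => min m l.length) d.length

-- zip(*data): the i-th tuple collects the i-th element of every row; i < every row's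
-- length by pyZipMinLen, so getD's default is never used (exact).
def pyZipStar (data : List (List String)) : List (List String) :=
  (List.range (pyZipMinLen data)).map (fun i => data.map (fun l => l.getD i ""))

def mmcif_loop_to_list (prefix_ : String) (parsed_info : List (String × List String)) : List (List (String × String)) :=
  -- the single loop appending to cols and data
  let cd := parsed_info.foldl
    (fun acc kv => if PySem.Str.startswith kv.1 prefix_ then (acc.1 ++ [kv.1], acc.2 ++ [kv.2]) else acc)
    (([] : List String), ([] : List (List String)))
  -- the assert raises outside Pre_; under Pre_ it passes
  (pyZipStar cd.2).map (fun xs =>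
    (cd.1.zip xs).foldl (fun d p => pyDictInsert d p.1 p.2) ([] : List (String × String)))

-- ===== PORT B =====
-- Source B's recursive helper 'rows': empty columns or an empty first column yields [],
-- otherwise build one row dict from every column's head (vs[0]; headD's default is
-- never used under Pre_, where all column lengths are equal) and recurse on the tails.
def peelRows : List (String × List String) → List (List (String × String))
  | [] => []
  | (k, v) :: rest =>
    match v with
    | [] => []
    | _ :: vtail =>
      (((k, v) :: rest).foldl (fun d kv => pyDictInsert d kv.1 (kv.2.headD "")) [])
        :: peelRows ((k, vtail) :: rest.map (fun kv => (kv.1, kv.2.drop 1)))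
termination_by columns => (columns.headD ("", [])).2.length
decreasing_by simp

def mmcif_loop_to_list_alt (prefix_ : String) (parsed_info : List (String × List String)) : List (List (String × String)) :=
  let matched := parsed_info.filter (fun kv => PySem.Str.startswith kv.1 prefix_)
  -- the assert raises outside Pre_; under Pre_ it passes
  peelRows matched

-- ===== PRECONDITION & SPEC =====
-- Pre_ excludes exactly the inputs where the assert fires (AssertionError): some
-- prefix-matched value list has a length different from the first matched one.
def Pre_mmcif_loop_to_list (prefix_ : String) (parsed_info : List (String × List String)) : Prop :=
  (match parsed_info.filter (fun kv => PySem.Str.startswith kv.1 prefix_) with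
   | [] => true
   | m :: ms => ms.all (fun kv => kv.2.length == m.2.length)) = true
instance (prefix_ : String) (parsed_info : List (String × List String)) : Decidable (Pre_mmcif_loop_to_list prefix_ parsed_info) := by unfold Pre_mmcif_loop_to_list; infer_instance

def pvWitness_mmcif_loop_to_list : String × (List (String × List String)) :=
  ("_a.", [("_a.x", ["1", "2"]), ("_a.y", ["A", "B"]), ("other", ["z"])])

def Spec_mmcif_loop_to_list (prefix_ : String) (parsed_info : List (String × List String)) (out : List (List (String × String))) : Prop := out = mmcif_loop_to_list_alt prefix_ parsed_info
instance (prefix_ : String) (parsed_info : List (String × List String)) (out : List (List (String × String))) : Decidable (Spec_mmcif_loop_to_list prefix_ parsed_info out) := by unfold Spec_mmcif_loop_to_list; infer_instance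

-- ===== CLAIM (what is proved, stated in full; the proofs are below) =====
def Claim_equal_mmcif_loop_to_list : Prop := ∀ (prefix_ : String) (parsed_info : List (String × List String)), Dom_mmcif_loop_to_list prefix_ parsed_info → Pre_mmcif_loop_to_list prefix_ parsed_info → Spec_mmcif_loop_to_list prefix_ parsed_info (mmcif_loop_to_list prefix_ parsed_info)

-- ===== LEMMAS AND PROOFS =====

-- A's single loop builds (filtered keys, filtered values)
theorem foldl_pair_filter (prefix_ : String) (l : List (String × List String))
    (c : List String) (d : List (List String)) :
    l.foldl (fun acc kv => if PySem.Str.startswith kv.1 prefix_ then (acc.1 ++ [kv.1], acc.2 ++ [kv.2]) else acc) (c, d)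
    = (c ++ (l.filter (fun kv => PySem.Str.startswith kv.1 prefix_)).map Prod.fst,
       d ++ (l.filter (fun kv => PySem.Str.startswith kv.1 prefix_)).map Prod.snd) := by
  induction l generalizing c d with
  | nil => simp
  | cons kv t ih =>
    simp only [List.foldl_cons, List.filter_cons]
    by_cases h : PySem.Str.startswith kv.1 prefix_ = true
    · rw [if_pos h, if_pos h, ih]
      simp
    · rw [if_neg h, if_neg h, ih]

theorem foldl_min_const (n : Nat) (ms : List (String × List String))
    (h : ms.all (fun kv => kv.2.length == n) = true) :
    (ms.map Prod.snd).foldl (fun m l => min m l.length) n = n := by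
  induction ms with
  | nil => rfl
  | cons kv t ih =>
    simp only [List.all_cons, Bool.and_eq_true, beq_iff_eq] at h
    simp only [List.map_cons, List.foldl_cons, h.1, Nat.min_self]
    exact ih h.2

-- A's i-th row fold over (cols.zip xs) is a single fold over the matched pairs
theorem A_row (qs : List (String × List String)) (i : Nat) :
    ((qs.map Prod.fst).zip ((qs.map Prod.snd).map (fun l => l.getD i ""))).foldl
      (fun d p => pyDictInsert d p.1 p.2) ([] : List (String × String))
    = qs.foldl (fun d kv => pyDictInsert d kv.1 (kv.2.getD i "")) ([] : List (String × String)) := by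
  rw [List.map_map, List.zip_map', List.foldl_map]
  rfl

-- (vs[1:])[i] = vs[i+1] for the getD reading (both sides default for short lists)
theorem getD_drop_one (vs : List String) (i : Nat) :
    (vs.drop 1).getD i "" = vs.getD (i + 1) "" := by
  cases vs <;> simp

-- B's head-peeling recursion computes exactly the indexed rows when all columns
-- have the same length n
theorem peelRows_eq (n : Nat) (k : String) (v : List String)
    (rest : List (String × List String)) (hv : v.length = n)
    (h : ∀ kv ∈ rest, kv.2.length = n) :
    peelRows ((k, v) :: rest)
    = (List.range n).map (fun i =>
        ((k, v) :: rest).foldl (fun d kv => pyDictInsert d kv.1 (kv.2.getD i "")) ([] : List (String × String))) := by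
  induction n generalizing k v rest with
  | zero =>
    have : v = [] := List.length_eq_zero_iff.mp hv
    subst this
    simp [peelRows]
  | succ n ih =>
    obtain ⟨v0, vt, rfl⟩ : ∃ v0 vt, v = v0 :: vt := by
      cases v with
      | nil => simp at hv
      | cons a t => exact ⟨a, t, rfl⟩
    rw [List.range_succ_eq_map, List.map_cons, List.map_map]
    show peelRows ((k, v0 :: vt) :: rest) = _
    rw [peelRows]
    congr 1
    · -- head row: headD = getD 0
      have : (fun (d : List (String × String)) (kv : String × List String) =>
          pyDictInsert d kv.1 (kv.2.headD ""))
        = (fun d kv => pyDictInsert d kv.1 (kv.2.getD 0 "")) := by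
        funext d kv; cases kv.2 <;> rfl
      rw [this]
    · -- tail rows via the IH on the peeled columns
      have hrest : ∀ kv ∈ rest.map (fun kv => (kv.1, kv.2.drop 1)), kv.2.length = n := by
        intro kv hkv
        simp only [List.mem_map] at hkv
        obtain ⟨q, hq, rfl⟩ := hkv
        have := h q hq
        simp [this]
      rw [ih k vt (rest.map (fun kv => (kv.1, kv.2.drop 1))) (by simpa using hv) hrest]
      apply List.map_congr_left
      intro i _
      simp only [Function.comp_apply, List.foldl_cons, List.getD_cons_succ]
      rw [List.foldl_map]
      have : (fun (d : List (String × String)) (kv : String × List String) =>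
            pyDictInsert d kv.1 ((kv.2.drop 1).getD i ""))
          = (fun d kv => pyDictInsert d kv.1 (kv.2.getD (i + 1) "")) := by
        funext d kv; rw [getD_drop_one]
      simp only [this]

-- ===== VERDICT (by name: the statement is the Claim_ definition above) =====
theorem mmcif_loop_to_list_spec : Claim_equal_mmcif_loop_to_list := by
  intro prefix_ parsed_info _ hpre
  unfold Pre_mmcif_loop_to_list at hpre
  unfold Spec_mmcif_loop_to_list mmcif_loop_to_list mmcif_loop_to_list_alt
  rw [foldl_pair_filter]
  simp only [List.nil_append]
  rcases hfl : parsed_info.filter (fun kv => PySem.Str.startswith kv.1 prefix_) with _ | ⟨m, ms⟩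
  · rw [hfl]
    simp [pyZipStar, pyZipMinLen, peelRows]
  · rw [hfl] at hpre ⊢
    have hall : (ms.all fun kv => kv.2.length == m.2.length) = true := hpre
    have hmin : pyZipMinLen ((m :: ms).map Prod.snd) = m.2.length := by
      simpa [pyZipMinLen] using foldl_min_const m.2.length ms hall
    obtain ⟨mk, mv⟩ := m
    rw [pyZipStar, hmin, List.map_map]
    rw [peelRows_eq mv.length mk mv ms rfl
      (by intro kv hkv; exact beq_iff_eq.mp (List.all_eq_true.mp hall kv hkv))]
    apply List.map_congr_left
    intro i _
    simpa using A_row ((mk, mv) :: ms) i
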